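-- pv_equiv track=rewrite | github.com/yakuro-it/foundation-of-computer-science | task2-setting/task2_setting_solver.py | heuristic_backtracking
-- ===== SOURCE A (Python) =====
-- from typing import Dict, List, Set, Tuple, Optional
--
-- def valid_adj(a: str, b: str, city: Dict[str, str], friends: Set[Tuple[str, str]]) -> bool:
--     if (a, b) in friends or (b, a) in friends:
--         return False
--     if city[a] == city[b]:
--         return False
--     return True
--
-- def constraint_degree(s: str, students: List[str], city: Dict[str, str], friends: Set[Tuple[str, str]]) -> int:
--     friend_count = sum(1 for x in students if (s, x) in friends or (x, s) in friends)
--     same_city = sum(1 for x in students if city[x] == city[s] and x != s)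
--     return friend_count + same_city
--
-- def heuristic_backtracking(students: List[str], city: Dict[str, str], friends: Set[Tuple[str, str]]) -> Optional[List[str]]:
--     ordered = sorted(students, key=lambda s: constraint_degree(s, students, city, friends), reverse=True)
--
--     def backtrack(arr: List[str], used: Set[str]) -> Optional[List[str]]:
--         if len(arr) == len(students):
--             return arr
--
--         for s in ordered:
--             if s in used:
--                 continue
--             if not arr or valid_adj(arr[-1], s, city, friends):
--                 used.add(s)
--                 res = backtrack(arr + [s], used)
--                 if res:
--                     return res
--                 used.remove(s)
--         return None
--
--     return backtrack([], set())
-- ===== SOURCE B (Python) =====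
-- # Same first-found arrangement as A, but the depth-first search runs as an
-- # iterative loop over an explicit cursor stack instead of recursion, and the
-- # sort key is computed in a single pass over the students.
--
-- def _ok_adjacent(a, b, city, friends):
--     return not ((a, b) in friends or (b, a) in friends) and city[a] != city[b]
--
-- def _degree(s, students, city, friends):
--     d = 0
--     for x in students:
--         if (s, x) in friends or (x, s) in friends:
--             d += 1
--         if city[x] == city[s] and x != s:
--             d += 1
--     return d
--
-- def heuristic_backtracking(students, city, friends):
--     ordered = sorted(students, key=lambda s: _degree(s, students, city, friends), reverse=True)
--     n = len(students)
--     arr = []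
--     used = set()
--     stack = [0]                      # stack[-1] = next candidate index of the top frame
--     while stack:
--         if len(arr) == n:
--             return arr
--         i = stack[-1]
--         if i == len(ordered):        # frame exhausted: backtrack
--             stack.pop()
--             if arr:
--                 used.remove(arr.pop())
--             continue
--         stack[-1] = i + 1
--         s = ordered[i]
--         if s in used:
--             continue
--         if arr and not _ok_adjacent(arr[-1], s, city, friends):
--             continue
--         arr.append(s)
--         used.add(s)
--         stack.append(0)              # open a child frame
--     return None
-- ===== Notes on version B (the rewrite author's own statement) =====
-- stated objective: alternative
-- what changed: The recursive depth-first backtracking is replaced by an iterative loop over an explicit cursor stack (push/advance/pop), and the two-sum constraint degree is computed in one pass; candidate order and guards are identical, so the first arrangement found is the same.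
import Mathlib
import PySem

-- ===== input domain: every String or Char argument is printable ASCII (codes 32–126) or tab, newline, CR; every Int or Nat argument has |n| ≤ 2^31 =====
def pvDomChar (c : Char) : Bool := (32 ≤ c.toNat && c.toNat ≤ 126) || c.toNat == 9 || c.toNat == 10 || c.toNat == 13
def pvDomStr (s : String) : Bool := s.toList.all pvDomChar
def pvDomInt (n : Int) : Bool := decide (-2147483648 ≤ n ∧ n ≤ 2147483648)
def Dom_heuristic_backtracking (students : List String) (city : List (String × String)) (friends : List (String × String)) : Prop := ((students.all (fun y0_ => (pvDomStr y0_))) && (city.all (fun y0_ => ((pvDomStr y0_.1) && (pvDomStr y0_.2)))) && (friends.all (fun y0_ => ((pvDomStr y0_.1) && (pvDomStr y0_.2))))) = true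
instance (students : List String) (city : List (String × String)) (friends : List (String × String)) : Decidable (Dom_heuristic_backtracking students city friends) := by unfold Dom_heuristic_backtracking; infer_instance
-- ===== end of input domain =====

-- B runs the same depth-first search iteratively with an explicit cursor stack instead of recursion (objective: alternative decomposition, same first-found arrangement).

-- ===== PORT A =====

-- city[a] / city[b]: Python raises KeyError on a missing key; Pre_ guarantees every
-- student is a key of city, on which getD with a dummy default is exact.
def valid_adj (a : String) (b : String) (city : PySem.Dict String String) (friends : List (String × String)) : Bool :=
  if friends.contains (a, b) || friends.contains (b, a) then false
  else if city.getD a "" == city.getD b "" then false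
  else true

-- the two 0/1-generator sums are List.countP (see PYSEM.md)
def constraint_degree (s : String) (students : List String) (city : PySem.Dict String String) (friends : List (String × String)) : Int :=
  ((students.countP (fun x => friends.contains (s, x) || friends.contains (x, s)) : Nat) : Int)
  + ((students.countP (fun x => (city.getD x "" == city.getD s "") && !(x == s)) : Nat) : Int)

-- the recursion `backtrack(arr, used)`; used.add before the call and used.remove after a
-- failed call cancel, so `used` is threaded functionally.  Fuel = students.length + 1 - arr.length
-- never reaches 0 before the base case (each level grows arr by one, stopping at length n).
mutual
def btA (n : Nat) (city : PySem.Dict String String) (friends : List (String × String)) (ordered : List String) : Nat → List String → PySem.Set String → Option (List String)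
  | 0, _, _ => none
  | f + 1, arr, used =>
    if arr.length = n then some arr
    else btLoopA n city friends ordered f arr used ordered
  termination_by f arr used => (f, 0)

def btLoopA (n : Nat) (city : PySem.Dict String String) (friends : List (String × String)) (ordered : List String) : Nat → List String → PySem.Set String → List String → Option (List String)
  | _, _, _, [] => none
  | f, arr, used, s :: rest =>
    if PySem.Set.contains used s then btLoopA n city friends ordered f arr used rest
    else if arr.isEmpty || valid_adj (PySem.List.pyGetD arr (-1) "") s city friends then
      match btA n city friends ordered f (arr ++ [s]) (PySem.Set.add used s) with
      | some res => if res.isEmpty then btLoopA n city friends ordered f arr used rest else some res  -- Python `if res:` (truthiness)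
      | none => btLoopA n city friends ordered f arr used rest
    else btLoopA n city friends ordered f arr used rest
  termination_by f arr used cands => (f, cands.length + 1)
end

def heuristic_backtracking (students : List String) (city : List (String × String)) (friends : List (String × String)) : Option (List String) :=
  let cityD := PySem.Dict.mk city
  let ordered := PySem.List.sorted students (fun s => constraint_degree s students cityD friends) true
  btA students.length cityD friends ordered (students.length + 1) [] PySem.Set.empty

-- ===== PORT B =====

def ok_adjacent (a : String) (b : String) (city : PySem.Dict String String) (friends : List (String × String)) : Bool :=
  !(friends.contains (a, b) || friends.contains (b, a)) && !(city.getD a "" == city.getD b "")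

def degree (s : String) (students : List String) (city : PySem.Dict String String) (friends : List (String × String)) : Int :=
  students.foldl (fun d x =>
    let d1 := if friends.contains (s, x) || friends.contains (x, s) then d + 1 else d
    if (city.getD x "" == city.getD s "") && !(x == s) then d1 + 1 else d1) 0

-- totality fuel for the while loop: an upper bound on the iterations needed to exhaust
-- a frame whose cursor is i when n - len(arr) = d (proved sufficient below)
def searchFuel (L : Nat) : Nat → Nat → Nat
  | 0, _ => 1
  | d + 1, i => if i < L then 1 + searchFuel L d 0 + searchFuel L (d + 1) (i + 1) else 1
termination_by d i => (d, L - i)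
decreasing_by
  · exact Prod.Lex.left _ _ (Nat.lt_succ_self d)
  · exact Prod.Lex.right _ (by omega)

-- the while loop; state = (arr, used, stack of cursors, top first); fuel-guarded (one unit per iteration)
def runB (n : Nat) (city : PySem.Dict String String) (friends : List (String × String)) (ordered : List String) : Nat → List String → PySem.Set String → List Nat → Option (List String)
  | 0, _, _, _ => none
  | _ + 1, _, _, [] => none
  | f + 1, arr, used, i :: stk =>
    if arr.length = n then some arr
    else if i = ordered.length then
      match arr.getLast? with        -- Python: if arr: used.remove(arr.pop())
      | some x => runB n city friends ordered f arr.dropLast (PySem.Set.discard used x) stk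
      | none => runB n city friends ordered f arr used stk
    else
      let s := ordered.getD i ""     -- i < len(ordered) here
      if PySem.Set.contains used s then runB n city friends ordered f arr used ((i + 1) :: stk)
      else if arr.isEmpty || ok_adjacent (arr.getLast?.getD "") s city friends then
        runB n city friends ordered f (arr ++ [s]) (PySem.Set.add used s) (0 :: (i + 1) :: stk)
      else runB n city friends ordered f arr used ((i + 1) :: stk)

def heuristic_backtracking_alt (students : List String) (city : List (String × String)) (friends : List (String × String)) : Option (List String) :=
  let cityD := PySem.Dict.mk city
  let ordered := PySem.List.sorted students (fun s => degree s students cityD friends) true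
  runB students.length cityD friends ordered (searchFuel ordered.length students.length 0) [] PySem.Set.empty [0]

-- ===== PRECONDITION & SPEC =====
-- Pre_ excludes exactly the inputs where Python A raises KeyError (a student that is
-- not a key of city; the sort key and valid_adj look every student up).
def Pre_heuristic_backtracking (students : List String) (city : List (String × String)) (friends : List (String × String)) : Prop :=
  ∀ s ∈ students, (PySem.Dict.mk city).contains s = true
instance (students : List String) (city : List (String × String)) (friends : List (String × String)) : Decidable (Pre_heuristic_backtracking students city friends) := by unfold Pre_heuristic_backtracking; infer_instance

def pvWitness_heuristic_backtracking : List String × (List (String × String)) × (List (String × String)) :=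
  (["ann", "bob", "cal"], [("ann", "X"), ("bob", "Y"), ("cal", "X")], [("ann", "bob")])

def Spec_heuristic_backtracking (students : List String) (city : List (String × String)) (friends : List (String × String)) (out : Option (List String)) : Prop := out = heuristic_backtracking_alt students city friends
instance (students : List String) (city : List (String × String)) (friends : List (String × String)) (out : Option (List String)) : Decidable (Spec_heuristic_backtracking students city friends out) := by unfold Spec_heuristic_backtracking; infer_instance

-- ===== CLAIM (what is proved, stated in full; the proofs are below) =====
def Claim_equal_heuristic_backtracking : Prop := ∀ (students : List String) (city : List (String × String)) (friends : List (String × String)), Dom_heuristic_backtracking students city friends → Pre_heuristic_backtracking students city friends → Spec_heuristic_backtracking students city friends (heuristic_backtracking students city friends)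

-- ===== LEMMAS AND PROOFS =====

-- B's adjacency test equals A's
lemma ok_eq_valid (a b : String) (c : PySem.Dict String String) (fr : List (String × String)) :
    ok_adjacent a b c fr = valid_adj a b c fr := by
  unfold ok_adjacent valid_adj
  cases h1 : (fr.contains (a, b) || fr.contains (b, a)) <;>
    cases h2 : (c.getD a "" == c.getD b "") <;> simp

-- B's one-pass degree equals A's two counts
lemma degree_foldl (s : String) (c : PySem.Dict String String) (fr : List (String × String)) :
    ∀ (l : List String) (a : Int),
      l.foldl (fun d x =>
        let d1 := if fr.contains (s, x) || fr.contains (x, s) then d + 1 else d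
        if (c.getD x "" == c.getD s "") && !(x == s) then d1 + 1 else d1) a
      = a + ((l.countP (fun x => fr.contains (s, x) || fr.contains (x, s)) : Nat) : Int)
          + ((l.countP (fun x => (c.getD x "" == c.getD s "") && !(x == s)) : Nat) : Int) := by
  intro l
  induction l with
  | nil => intro a; simp
  | cons x l ih =>
    intro a
    simp only [List.foldl_cons, List.countP_cons, ih]
    split_ifs <;> push_cast <;> omega

lemma degree_eq (s : String) (students : List String) (c : PySem.Dict String String) (fr : List (String × String)) :
    degree s students c fr = constraint_degree s students c fr := by
  unfold degree constraint_degree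
  rw [degree_foldl]
  omega

-- the two guards agree (arr[-1] for a nonempty arr is its last element)
lemma pyGetD_neg_one (arr : List String) (h : arr ≠ []) :
    PySem.List.pyGetD arr (-1) "" = arr.getLast?.getD "" := by
  have hl : 0 < arr.length := List.length_pos_iff.mpr h
  simp only [PySem.List.pyGetD, PySem.List.pyGet?, PySem.List.pyIdx?]
  rw [if_neg (by norm_num), if_pos (by omega)]
  show ((some (arr.length - (-(-1:Int)).toNat)).bind fun k => arr[k]?).getD "" = _
  norm_num
  rw [List.getLast?_eq_getElem?]

lemma guard_eq (arr : List String) (s : String) (c : PySem.Dict String String) (fr : List (String × String)) :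
    (arr.isEmpty || ok_adjacent (arr.getLast?.getD "") s c fr)
      = (arr.isEmpty || valid_adj (PySem.List.pyGetD arr (-1) "") s c fr) := by
  rcases eq_or_ne arr [] with rfl | h
  · rfl
  · rw [pyGetD_neg_one arr h, ok_eq_valid]

-- a success of A's recursion extends arr (so it is nonempty whenever arr ++ [s] is)
lemma btLoop_prefix (n : Nat) (c : PySem.Dict String String) (fr : List (String × String)) (ord : List String) (f : Nat)
    (ih : ∀ arr used r, btA n c fr ord f arr used = some r → arr <+: r) :
    ∀ cands arr used r, btLoopA n c fr ord f arr used cands = some r → arr <+: r := by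
  intro cands
  induction cands with
  | nil => intro arr used r h; simp [btLoopA] at h
  | cons s rest ihc =>
    intro arr used r h
    rw [btLoopA] at h
    split at h
    · exact ihc arr used r h
    · split at h
      · cases hb : btA n c fr ord f (arr ++ [s]) (PySem.Set.add used s) with
        | none => rw [hb] at h; exact ihc arr used r h
        | some res =>
          rw [hb] at h
          simp only [] at h
          by_cases he : res.isEmpty
          · rw [if_pos he] at h; exact ihc arr used r h
          · rw [if_neg he] at h
            cases h
            exact (List.prefix_append arr [s]).trans (ih _ _ _ hb)
      · exact ihc arr used r h

lemma btA_prefix (n : Nat) (c : PySem.Dict String String) (fr : List (String × String)) (ord : List String) :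
    ∀ f arr used r, btA n c fr ord f arr used = some r → arr <+: r := by
  intro f
  induction f with
  | zero => intro arr used r h; simp [btA] at h
  | succ f ih =>
    intro arr used r h
    rw [btA] at h
    split at h
    · cases h; exact List.prefix_refl _
    · exact btLoop_prefix n c fr ord f ih ord arr used r h

-- discarding a freshly added element restores the set
lemma discard_add (used : PySem.Set String) (s : String) (h : PySem.Set.contains used s = false) :
    PySem.Set.discard (PySem.Set.add used s) s = used := by
  have hs : s ∉ used := by simpa [PySem.Set.contains] using h
  unfold PySem.Set.add PySem.Set.discard
  rw [if_neg (by simp [PySem.Set.contains, hs])]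
  rw [List.filter_append]
  have h1 : List.filter (fun y => !(y == s)) used = used := by
    apply List.filter_eq_self.mpr
    intro a ha
    simp only [Bool.not_eq_eq_eq_not, Bool.not_true, beq_eq_false_iff_ne]
    rintro rfl; exact hs ha
  simp [h1]

-- runB unfolded one step (one loop iteration)
lemma runB_succ (n : Nat) (c : PySem.Dict String String) (fr : List (String × String)) (ord : List String)
    (f : Nat) (arr : List String) (used : PySem.Set String) (i : Nat) (stk : List Nat) :
    runB n c fr ord (f + 1) arr used (i :: stk) =
      if arr.length = n then some arr
      else if i = ord.length then
        match arr.getLast? with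
        | some x => runB n c fr ord f arr.dropLast (PySem.Set.discard used x) stk
        | none => runB n c fr ord f arr used stk
      else
        let s := ord.getD i ""
        if PySem.Set.contains used s then runB n c fr ord f arr used ((i + 1) :: stk)
        else if arr.isEmpty || ok_adjacent (arr.getLast?.getD "") s c fr then
          runB n c fr ord f (arr ++ [s]) (PySem.Set.add used s) (0 :: (i + 1) :: stk)
        else runB n c fr ord f arr used ((i + 1) :: stk) := rfl

-- proof-side view of A's search from cursor i at remaining depth d (fuel = depth exactly)
def AS (n : Nat) (c : PySem.Dict String String) (fr : List (String × String)) (ord : List String) : Nat → List String → PySem.Set String → Nat → Option (List String)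
  | 0, arr, _, _ => some arr
  | d + 1, arr, used, i => btLoopA n c fr ord (d + 1) arr used (ord.drop i)

lemma btA_eq_AS (n : Nat) (c : PySem.Dict String String) (fr : List (String × String)) (ord : List String)
    (d : Nat) (arr : List String) (used : PySem.Set String) (h : arr.length + d = n) :
    btA n c fr ord (d + 1) arr used = AS n c fr ord d arr used 0 := by
  cases d with
  | zero => simp only [btA, AS]; simp [← h]
  | succ e =>
    simp only [btA, AS, List.drop_zero]
    have : ¬ arr.length = n := by omega
    simp [this]

-- the machine simulates A's search: from a frame with cursor i either it returns A's
-- answer (for any fuel ≥ searchFuel), or it consumes t ≤ searchFuel steps and pops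
lemma sim (n : Nat) (c : PySem.Dict String String) (fr : List (String × String)) (ord : List String) :
    ∀ d k i, i ≤ ord.length → k = ord.length - i →
      ∀ (arr : List String) (used : PySem.Set String) (stk : List Nat), arr.length + d = n →
      ((∀ r, AS n c fr ord d arr used i = some r →
          ∀ g, runB n c fr ord (searchFuel ord.length d i + g) arr used (i :: stk) = some r)
       ∧ (AS n c fr ord d arr used i = none →
          ∃ t, t ≤ searchFuel ord.length d i ∧ ∀ g, runB n c fr ord (t + g) arr used (i :: stk) =
            match arr.getLast? with
            | some x => runB n c fr ord g arr.dropLast (PySem.Set.discard used x) stk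
            | none => runB n c fr ord g arr used stk)) := by
  intro d
  induction d with
  | zero =>
    intro k i _ _ arr used stk hlen
    constructor
    · intro r hr g
      simp only [AS, Option.some.injEq] at hr
      subst hr
      have hf : searchFuel ord.length 0 i + g = g + 1 := by simp [searchFuel]; omega
      rw [hf, runB_succ, if_pos (by omega)]
    · intro hnone; simp [AS] at hnone
  | succ d ihd =>
    intro k
    induction k with
    | zero =>
      intro i hiL hk arr used stk hlen
      have hiL' : i = ord.length := by omega
      subst hiL'
      have hne : ¬ arr.length = n := by omega
      have hSF : searchFuel ord.length (d + 1) ord.length = 1 := by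
        rw [searchFuel]; simp
      constructor
      · intro r hr
        simp [AS, List.drop_length, btLoopA] at hr
      · intro _
        refine ⟨1, by omega, fun g => ?_⟩
        have hf : 1 + g = g + 1 := by omega
        rw [hf, runB_succ, if_neg hne, if_pos rfl]
    | succ k ihk =>
      intro i hiL hk arr used stk hlen
      have hi : i < ord.length := by omega
      have hne : ¬ arr.length = n := by omega
      have hiL' : ¬ i = ord.length := by omega
      set L := ord.length with hL
      set s := ord.getD i "" with hs
      have hdrop : ord.drop i = s :: ord.drop (i + 1) := by
        rw [hs, List.getD_eq_getElem ord "" hi]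
        exact (List.getElem_cons_drop hi).symm
      have hSF : searchFuel L (d + 1) i
          = 1 + searchFuel L d 0 + searchFuel L (d + 1) (i + 1) := by
        rw [searchFuel, if_pos hi]
      have hAS : AS n c fr ord (d + 1) arr used i
          = btLoopA n c fr ord (d + 1) arr used (s :: ord.drop (i + 1)) := by
        simp only [AS]; rw [hdrop]
      -- the machine's one iteration
      have hstep : ∀ m, runB n c fr ord (m + 1) arr used (i :: stk) =
          (if PySem.Set.contains used s then runB n c fr ord m arr used ((i + 1) :: stk)
           else if arr.isEmpty || valid_adj (PySem.List.pyGetD arr (-1) "") s c fr then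
             runB n c fr ord m (arr ++ [s]) (PySem.Set.add used s) (0 :: (i + 1) :: stk)
           else runB n c fr ord m arr used ((i + 1) :: stk)) := by
        intro m
        rw [runB_succ, if_neg hne, if_neg hiL']
        simp only [← hs, guard_eq]
      obtain ⟨ihk1, ihk2⟩ := ihk (i + 1) (by omega) (by omega) arr used stk hlen
      by_cases hused : PySem.Set.contains used s
      · -- candidate already used: skip
        rw [hAS, btLoopA, if_pos hused]
        have hAS' : btLoopA n c fr ord (d + 1) arr used (ord.drop (i + 1))
            = AS n c fr ord (d + 1) arr used (i + 1) := by simp only [AS]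
        rw [hAS']
        constructor
        · intro r hr g
          have hf : searchFuel L (d + 1) i + g
              = (searchFuel L (d + 1) (i + 1) + (searchFuel L d 0 + g)) + 1 := by omega
          rw [hf, runB_succ, if_neg hne, if_neg hiL']
          simp only [← hs, guard_eq]
          rw [if_pos hused]
          exact ihk1 r hr _
        · intro hnone
          obtain ⟨t, ht, hrun⟩ := ihk2 hnone
          refine ⟨t + 1, by omega, fun g => ?_⟩
          have hf : t + 1 + g = (t + g) + 1 := by omega
          rw [hf, hstep, if_pos hused]
          exact hrun g
      · rw [hAS, btLoopA, if_neg hused]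
        by_cases hadj : (arr.isEmpty || valid_adj (PySem.List.pyGetD arr (-1) "") s c fr) = true
        · -- try the candidate: recurse into the child frame
          rw [if_pos hadj]
          have hchildlen : (arr ++ [s]).length + d = n := by simp; omega
          have hbtA : btA n c fr ord (d + 1) (arr ++ [s]) (PySem.Set.add used s)
              = AS n c fr ord d (arr ++ [s]) (PySem.Set.add used s) 0 :=
            btA_eq_AS n c fr ord d _ _ hchildlen
          obtain ⟨ihd1, ihd2⟩ := ihd (L - 0) 0 (by omega) (by omega) (arr ++ [s]) (PySem.Set.add used s) ((i + 1) :: stk) hchildlen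
          cases hc : AS n c fr ord d (arr ++ [s]) (PySem.Set.add used s) 0 with
          | some res =>
            have hres : res ≠ [] := by
              have hpre := btA_prefix n c fr ord (d + 1) (arr ++ [s]) (PySem.Set.add used s) res (by rw [hbtA, hc])
              intro h0; rw [h0] at hpre
              simp at hpre
            have hresE : res.isEmpty = false := by simp [hres]
            rw [hbtA, hc]
            simp only [hresE, Bool.false_eq_true, if_false]
            constructor
            · intro r hr g
              cases hr
              have hf : searchFuel L (d + 1) i + g
                  = (searchFuel L d 0 + (searchFuel L (d + 1) (i + 1) + g)) + 1 := by omega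
              rw [hf, hstep, if_neg hused, if_pos hadj]
              exact ihd1 res hc _
            · intro h0; cases h0
          | none =>
            rw [hbtA, hc]
            have hAS' : btLoopA n c fr ord (d + 1) arr used (ord.drop (i + 1))
                = AS n c fr ord (d + 1) arr used (i + 1) := by simp only [AS]
            rw [hAS']
            obtain ⟨t', ht', hrun'⟩ := ihd2 hc
            have hpop : ∀ g, runB n c fr ord (t' + g) (arr ++ [s]) (PySem.Set.add used s) (0 :: (i + 1) :: stk)
                = runB n c fr ord g arr used ((i + 1) :: stk) := by
              intro g
              rw [hrun' g, List.getLast?_concat, List.dropLast_concat]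
              simp only [discard_add used s (by simpa using hused)]
            constructor
            · intro r hr g
              have hf : searchFuel L (d + 1) i + g
                  = (t' + ((searchFuel L d 0 - t') + searchFuel L (d + 1) (i + 1) + g)) + 1 := by omega
              rw [hf, hstep, if_neg hused, if_pos hadj, hpop]
              have hf2 : searchFuel L d 0 - t' + searchFuel L (d + 1) (i + 1) + g
                  = searchFuel L (d + 1) (i + 1) + (searchFuel L d 0 - t' + g) := by omega
              rw [hf2]
              exact ihk1 r hr _
            · intro hnone
              obtain ⟨t'', ht'', hrun''⟩ := ihk2 hnone
              refine ⟨1 + t' + t'', by omega, fun g => ?_⟩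
              have hf : 1 + t' + t'' + g = (t' + (t'' + g)) + 1 := by omega
              rw [hf, hstep, if_neg hused, if_pos hadj, hpop]
              exact hrun'' g
        · -- adjacency fails: skip
          rw [if_neg hadj]
          have hAS' : btLoopA n c fr ord (d + 1) arr used (ord.drop (i + 1))
              = AS n c fr ord (d + 1) arr used (i + 1) := by simp only [AS]
          rw [hAS']
          constructor
          · intro r hr g
            have hf : searchFuel L (d + 1) i + g
                = (searchFuel L (d + 1) (i + 1) + (searchFuel L d 0 + g)) + 1 := by omega
            rw [hf, hstep, if_neg hused, if_neg hadj]
            exact ihk1 r hr _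
          · intro hnone
            obtain ⟨t, ht, hrun⟩ := ihk2 hnone
            refine ⟨t + 1, by omega, fun g => ?_⟩
            have hf : t + 1 + g = (t + g) + 1 := by omega
            rw [hf, hstep, if_neg hused, if_neg hadj]
            exact hrun g

theorem main_eq (n : Nat) (c : PySem.Dict String String) (fr : List (String × String)) (ord : List String) :
    btA n c fr ord (n + 1) [] PySem.Set.empty
      = runB n c fr ord (searchFuel ord.length n 0) [] PySem.Set.empty [0] := by
  cases n with
  | zero =>
    have h1 : searchFuel ord.length 0 0 = 1 := by simp [searchFuel]
    rw [h1, btA, show (1 : Nat) = 0 + 1 from rfl, runB_succ]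
    simp
  | succ m =>
    have hlen : ([] : List String).length + (m + 1) = m + 1 := by simp
    rw [btA_eq_AS (m + 1) c fr ord (m + 1) [] PySem.Set.empty hlen]
    obtain ⟨h1, h2⟩ := sim (m + 1) c fr ord (m + 1) (ord.length - 0) 0 (by omega) rfl [] PySem.Set.empty [] hlen
    cases hv : AS (m + 1) c fr ord (m + 1) [] PySem.Set.empty 0 with
    | some r =>
      have := h1 r hv 0
      rw [Nat.add_zero] at this
      exact this.symm
    | none =>
      obtain ⟨t, ht, hrun⟩ := h2 hv
      have hrn : ∀ f, runB (m + 1) c fr ord f ([] : List String) PySem.Set.empty [] = none := by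
        intro f; cases f <;> rfl
      have := hrun (searchFuel ord.length (m + 1) 0 - t)
      rw [Nat.add_sub_cancel' ht] at this
      rw [this]
      simp only [List.getLast?_nil]
      exact (hrn _).symm

-- ===== VERDICT (by name: the statement is the Claim_ definition above) =====
theorem heuristic_backtracking_spec : Claim_equal_heuristic_backtracking := by
  intro students city friends _ _
  unfold Spec_heuristic_backtracking heuristic_backtracking heuristic_backtracking_alt
  have hk : (fun s => degree s students (PySem.Dict.mk city) friends)
      = (fun s => constraint_degree s students (PySem.Dict.mk city) friends) := by
    funext s; exact degree_eq s students (PySem.Dict.mk city) friends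
  simp only [hk]
  rw [main_eq]
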